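-- pv_equiv track=rewrite | github.com/donhat-dev/open-workflow-studio | workflow_pilot/models/workflow_executor.py | _collapse_dirty_paths
-- ===== SOURCE A (Python) =====
-- def _collapse_dirty_paths(paths):
--     if "" in paths:
--         return {""}
--     ordered = sorted(paths, key=lambda value: value.count("."))
--     collapsed = set()
--     for path in ordered:
--         skip = False
--         for existing in collapsed:
--             if path == existing:
--                 skip = True
--                 break
--             if path.startswith(existing) and len(path) > len(existing):
--                 next_char = path[len(existing)]
--                 if next_char in ".[":
--                     skip = True
--                     break
--         if not skip:
--             collapsed.add(path)
--     return collapsed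
-- ===== SOURCE B (Python) =====
-- def _collapse_dirty_paths(paths):
--     # B: same sorted order, but instead of scanning the whole collapsed set for
--     # each path, test only the path's own boundary prefixes for set membership.
--     if "" in paths:
--         return {""}
--     collapsed = set()
--     for path in sorted(paths, key=lambda value: value.count(".")):
--         if path in collapsed:
--             continue
--         if any(path[:i] in collapsed for i in range(len(path)) if path[i] in ".["):
--             continue
--         collapsed.add(path)
--     return collapsed
-- ===== Notes on version B (the rewrite author's own statement) =====
-- stated objective: faster
-- what changed: Instead of scanning the entire collapsed set for a dominating ancestor of each path, B checks only the path's own boundary prefixes (cuts at '.' or '[') for membership in the hash set, removing the inner scan over collapsed.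
import Mathlib
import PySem

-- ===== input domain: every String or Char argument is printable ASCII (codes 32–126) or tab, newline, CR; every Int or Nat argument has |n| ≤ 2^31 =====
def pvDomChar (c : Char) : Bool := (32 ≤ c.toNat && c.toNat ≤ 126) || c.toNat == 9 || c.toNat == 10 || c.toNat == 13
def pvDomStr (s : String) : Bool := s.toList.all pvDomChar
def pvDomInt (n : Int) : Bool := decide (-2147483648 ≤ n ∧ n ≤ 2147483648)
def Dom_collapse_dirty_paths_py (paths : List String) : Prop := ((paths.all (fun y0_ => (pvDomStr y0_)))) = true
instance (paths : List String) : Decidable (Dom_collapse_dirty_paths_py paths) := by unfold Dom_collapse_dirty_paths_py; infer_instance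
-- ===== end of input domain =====

-- B replaces A's inner scan over the whole collapsed set by membership tests of the
-- path's own boundary prefixes (cuts before '.'/'['), measured faster at the largest size.
-- Both ports return the collapsed set as a list of its distinct elements.

-- shared helper: Python's `c in ".["` for the single character c (exact for one char)
def pvBoundChar (o : Option Char) : Bool :=
  match o with
  | some c => c == '.' || c == '['
  | none => false

-- ===== PORT A =====
def collapse_dirty_paths_py (paths : List String) : List String :=
  if paths.contains "" then [""]
  else
    -- for existing in collapsed: the loop only detects existence, so `any` is order-safe
    (PySem.List.sorted paths (fun value => PySem.Str.count value ".") false).foldl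
      (fun collapsed path =>
        let skip := collapsed.any (fun existing =>
          path == existing ||
          (PySem.Str.startswith path existing &&
            decide (PySem.Str.len existing < PySem.Str.len path) &&
            pvBoundChar (PySem.Str.pyGet? path (PySem.Str.len existing))))
        if !skip then PySem.Set.add collapsed path else collapsed)
      PySem.Set.empty

-- ===== PORT B =====
def collapse_dirty_paths_py_alt (paths : List String) : List String :=
  if paths.contains "" then [""]
  else
    (PySem.List.sorted paths (fun value => PySem.Str.count value ".") false).foldl
      (fun collapsed path =>
        if PySem.Set.contains collapsed path then collapsed
        else if (PySem.List.pyRange 0 (PySem.Str.len path) 1).any (fun i =>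
            pvBoundChar (PySem.Str.pyGet? path i) &&
            PySem.Set.contains collapsed (PySem.Str.slice path none (some i)))
          then collapsed
        else PySem.Set.add collapsed path)
      PySem.Set.empty

-- ===== PRECONDITION & SPEC =====
def Spec_collapse_dirty_paths_py (paths : List String) (out : List String) : Prop := out = collapse_dirty_paths_py_alt paths
instance (paths : List String) (out : List String) : Decidable (Spec_collapse_dirty_paths_py paths out) := by unfold Spec_collapse_dirty_paths_py; infer_instance

-- ===== CLAIM (what is proved, stated in full; the proofs are below) =====
def Claim_equal_collapse_dirty_paths_py : Prop := ∀ (paths : List String), Dom_collapse_dirty_paths_py paths → Spec_collapse_dirty_paths_py paths (collapse_dirty_paths_py paths)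

-- ===== LEMMAS AND PROOFS =====

-- A's inner scan finds a dominating element of c iff p itself, or one of p's
-- boundary prefixes, is in c.
set_option maxHeartbeats 1000000 in
lemma pv_skip_eq (c : List String) (p : String) :
    (c.any (fun existing =>
      p == existing ||
      (PySem.Str.startswith p existing &&
        decide (PySem.Str.len existing < PySem.Str.len p) &&
        pvBoundChar (PySem.Str.pyGet? p (PySem.Str.len existing)))))
    = (PySem.Set.contains c p ||
        (PySem.List.pyRange 0 (PySem.Str.len p) 1).any (fun i =>
          pvBoundChar (PySem.Str.pyGet? p i) &&
          PySem.Set.contains c (PySem.Str.slice p none (some i)))) := by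
  rw [Bool.eq_iff_iff]
  simp only [List.any_eq_true, Bool.or_eq_true, Bool.and_eq_true, decide_eq_true_eq,
    beq_iff_eq, PySem.Str.startswith_eq, PySem.Chars.startswith_iff, PySem.Str.len_eq,
    PySem.Str.pyGet?_eq, PySem.Chars.pyGet?_eq_listPyGet?, PySem.List.pyGet?_natCast,
    PySem.List.mem_pyRange_one, PySem.Set.contains_iff]
  constructor
  · rintro ⟨e, he, h | ⟨⟨hpre, hlen⟩, hb⟩⟩
    · exact Or.inl (h ▸ he)
    · refine Or.inr ⟨(e.toList.length : Int), ⟨by positivity, by exact_mod_cast hlen⟩, ⟨?_, ?_⟩⟩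
      · simpa using hb
      · have hsl : PySem.Str.slice p none (some (e.toList.length : Int)) = e := by
          apply String.toList_inj.mp
          rw [PySem.Str.toList_slice, PySem.Chars.slice_eq_listSlice,
            PySem.List.slice_to_natCast]
          exact (List.prefix_iff_eq_take.mp hpre).symm
        rw [hsl]; exact he
  · rintro (h | ⟨i, ⟨hi0, hilen⟩, hb, hmem⟩)
    · exact ⟨p, h, Or.inl rfl⟩
    · set e := PySem.Str.slice p none (some i) with hedef
      have hi : i = ((i.toNat : Nat) : Int) := (Int.toNat_of_nonneg hi0).symm
      have het : e.toList = p.toList.take i.toNat := by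
        rw [hedef, PySem.Str.toList_slice, PySem.Chars.slice_eq_listSlice]
        rw [show (some i : Option Int) = some ((i.toNat : Nat) : Int) from by rw [← hi]]
        exact PySem.List.slice_to_natCast _ _
      have hklen : i.toNat < p.toList.length := by omega
      have helen : e.toList.length = i.toNat := by
        rw [het, List.length_take]; omega
      refine ⟨e, hmem, Or.inr ⟨⟨?_, ?_⟩, ?_⟩⟩
      · rw [het]; exact List.take_prefix _ _
      · rw [helen]; exact_mod_cast hklen
      · rw [helen]
        have hg : PySem.List.pyGet? p.toList i = p.toList[i.toNat]? :=
          PySem.List.pyGet?_of_nonneg _ hi0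
        simpa [hg] using hb

lemma pv_step_eq :
    (fun (collapsed : List String) (path : String) =>
        let skip := collapsed.any (fun existing =>
          path == existing ||
          (PySem.Str.startswith path existing &&
            decide (PySem.Str.len existing < PySem.Str.len path) &&
            pvBoundChar (PySem.Str.pyGet? path (PySem.Str.len existing))))
        if !skip then PySem.Set.add collapsed path else collapsed)
    = (fun (collapsed : List String) (path : String) =>
        if PySem.Set.contains collapsed path then collapsed
        else if (PySem.List.pyRange 0 (PySem.Str.len path) 1).any (fun i =>
            pvBoundChar (PySem.Str.pyGet? path i) &&
            PySem.Set.contains collapsed (PySem.Str.slice path none (some i)))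
          then collapsed
        else PySem.Set.add collapsed path) := by
  funext c p
  simp only [pv_skip_eq]
  rcases h1 : PySem.Set.contains c p with _ | _ <;>
    rcases h2 : (PySem.List.pyRange 0 (PySem.Str.len p) 1).any (fun i =>
        pvBoundChar (PySem.Str.pyGet? p i) &&
        PySem.Set.contains c (PySem.Str.slice p none (some i))) with _ | _ <;>
    simp [PySem.Set.add]

-- ===== VERDICT (by name: the statement is the Claim_ definition above) =====
theorem collapse_dirty_paths_py_spec : Claim_equal_collapse_dirty_paths_py := by
  intro paths _
  unfold Spec_collapse_dirty_paths_py collapse_dirty_paths_py collapse_dirty_paths_py_alt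
  rw [pv_step_eq]
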